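-- pv_equiv track=rewrite | github.com/DanielSuba/A-Smart-Archive-of-Student-Projects | backend/services/difficulty_scorer.py | _score_advanced_technologies
-- ===== SOURCE A (Python) =====
-- from typing import Dict, List
--
-- ADVANCED_TECH = {
--     "Kubernetes", "TensorFlow", "PyTorch", "Elasticsearch", "GraphQL",
--     "React Native", "Flutter", "Rust", "Go", "Scala", "Spring Boot",
--     "AWS", "Azure", "GCP", "Docker", "scikit-learn"
-- }
--
-- def _score_advanced_technologies(technologies: List[Dict]) -> int:
--     matches = [tech for tech in technologies if tech.get("name") in ADVANCED_TECH]
--     score = 0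
--     for index, _tech in enumerate(matches):
--         if index < 2:
--             score += 6
--         elif index < 4:
--             score += 4
--         else:
--             score += 2
--     return score
-- ===== SOURCE B (Python) =====
-- ADVANCED_TECH = {
--     "Kubernetes", "TensorFlow", "PyTorch", "Elasticsearch", "GraphQL",
--     "React Native", "Flutter", "Rust", "Go", "Scala", "Spring Boot",
--     "AWS", "Azure", "GCP", "Docker", "scikit-learn"
-- }
--
-- def _score_advanced_technologies(technologies):
--     n = sum(1 for tech in technologies if tech.get("name") in ADVANCED_TECH)
--     return 6 * min(n, 2) + 4 * max(0, min(n, 4) - 2) + 2 * max(0, n - 4)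
-- ===== Notes on version B (the rewrite author's own statement) =====
-- stated objective: simpler
-- what changed: Replaces building the matches list and the per-index tier loop with a single count of matching technologies followed by a closed-form clamp expression over that count.
import Mathlib
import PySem

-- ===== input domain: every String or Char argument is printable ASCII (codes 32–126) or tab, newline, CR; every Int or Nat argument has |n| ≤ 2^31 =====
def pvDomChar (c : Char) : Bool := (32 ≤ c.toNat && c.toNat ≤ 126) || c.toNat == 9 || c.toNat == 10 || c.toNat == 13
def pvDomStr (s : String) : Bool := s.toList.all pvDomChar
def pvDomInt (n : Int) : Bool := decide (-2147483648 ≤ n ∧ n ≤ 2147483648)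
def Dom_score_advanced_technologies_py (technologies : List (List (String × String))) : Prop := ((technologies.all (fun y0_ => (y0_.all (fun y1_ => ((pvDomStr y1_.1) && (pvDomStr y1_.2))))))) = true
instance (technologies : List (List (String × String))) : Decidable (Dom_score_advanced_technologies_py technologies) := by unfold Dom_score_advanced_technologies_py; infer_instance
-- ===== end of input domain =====

-- B replaces A's matches list + per-index tier loop by a count and a closed-form clamp expression (simpler).

-- ===== PORT A =====
def advancedTech : List String :=
  ["Kubernetes", "TensorFlow", "PyTorch", "Elasticsearch", "GraphQL",
   "React Native", "Flutter", "Rust", "Go", "Scala", "Spring Boot",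
   "AWS", "Azure", "GCP", "Docker", "scikit-learn"]

-- tech.get("name") in ADVANCED_TECH  (get: first match in the assoc list; None is never in the set)
def techMatches (tech : List (String × String)) : Bool :=
  match tech.find? (fun p => p.1 == "name") with
  | some p => advancedTech.contains p.2
  | none => false

def score_advanced_technologies_py (technologies : List (List (String × String))) : Int :=
  let matched := technologies.filter techMatches
  (PySem.List.enumerate matched).foldl
    (fun score p =>
      if p.1 < 2 then score + 6
      else if p.1 < 4 then score + 4
      else score + 2) 0

-- ===== PORT B =====
def score_advanced_technologies_py_alt (technologies : List (List (String × String))) : Int :=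
  let n : Int := (technologies.countP (fun tech => techMatches tech) : Nat)
  6 * min n 2 + 4 * max 0 (min n 4 - 2) + 2 * max 0 (n - 4)

-- ===== PRECONDITION & SPEC =====
def Spec_score_advanced_technologies_py (technologies : List (List (String × String))) (out : Int) : Prop := out = score_advanced_technologies_py_alt technologies
instance (technologies : List (List (String × String))) (out : Int) : Decidable (Spec_score_advanced_technologies_py technologies out) := by unfold Spec_score_advanced_technologies_py; infer_instance

-- ===== CLAIM (what is proved, stated in full; the proofs are below) =====
def Claim_equal_score_advanced_technologies_py : Prop := ∀ (technologies : List (List (String × String))), Dom_score_advanced_technologies_py technologies → Spec_score_advanced_technologies_py technologies (score_advanced_technologies_py technologies)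

-- ===== LEMMAS AND PROOFS =====

def tierClosed (n : Int) : Int := 6 * min n 2 + 4 * max 0 (min n 4 - 2) + 2 * max 0 (n - 4)

def tierStep (score : Int) (p : Int × List (String × String)) : Int :=
  if p.1 < 2 then score + 6 else if p.1 < 4 then score + 4 else score + 2

def tierOf (i : Int) : Int := if i < 2 then 6 else if i < 4 then 4 else 2

-- pull a constant added to the accumulator out of the range fold
theorem tier_pull (m : List Int) : ∀ (c a : Int),
    m.foldl (fun a i => a + tierOf i) (a + c) = c + m.foldl (fun a i => a + tierOf i) a := by
  induction m with
  | nil => intro c a; simp [Int.add_comm]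
  | cons y ys ihm =>
    intro c a
    simp only [List.foldl_cons]
    rw [show a + c + tierOf y = (a + tierOf y) + c by ring, ihm]

-- the enumerate fold depends only on the length of the matched list
theorem tier_fold_eq (l : List (List (String × String))) : ∀ (s acc : Int),
    (PySem.List.enumerate l s).foldl tierStep acc
      = acc + (PySem.List.pyRange s (s + l.length) 1).foldl (fun a i => a + tierOf i) 0 := by
  induction l with
  | nil => simp [PySem.List.enumerate, PySem.List.pyRange]
  | cons x xs ih =>
    intro s acc
    rw [PySem.List.enumerate_cons, List.foldl_cons, ih (s + 1)]
    rw [PySem.List.pyRange_one_cons (show s < s + (((x :: xs).length : Nat) : Int) by simp)]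
    simp only [List.foldl_cons, List.length_cons, zero_add]
    have hc : (s + (((xs.length + 1 : Nat)) : Int)) = s + 1 + (xs.length : Int) := by
      push_cast; ring
    rw [hc, show tierOf s = 0 + tierOf s by ring, tier_pull]
    unfold tierStep tierOf
    split_ifs <;> ring

theorem range_fold_closed : ∀ (n : Nat),
    (PySem.List.pyRange 0 n 1).foldl (fun a i => a + tierOf i) 0 = tierClosed n := by
  intro n
  induction n with
  | zero => simp [PySem.List.pyRange, tierClosed]
  | succ m ih =>
    have h : ((m + 1 : Nat) : Int) = (m : Int) + 1 := by push_cast; ring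
    rw [h, PySem.List.pyRange_one_succ_right (by positivity), List.foldl_append, ih]
    simp only [List.foldl_cons, List.foldl_nil]
    unfold tierClosed tierOf
    split_ifs <;> omega

-- ===== VERDICT (by name: the statement is the Claim_ definition above) =====
theorem score_advanced_technologies_py_spec : Claim_equal_score_advanced_technologies_py := by
  intro technologies _
  unfold Spec_score_advanced_technologies_py score_advanced_technologies_py score_advanced_technologies_py_alt
  simp only []
  rw [show (fun (score : Int) (p : Int × List (String × String)) =>
        if p.1 < 2 then score + 6 else if p.1 < 4 then score + 4 else score + 2) = tierStep from rfl]
  rw [tier_fold_eq, List.countP_eq_length_filter]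
  simp only [zero_add]
  rw [range_fold_closed]
  rfl
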